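-- pv_equiv track=rewrite | github.com/nhatan172/deepdive-result | deepdive/udf/extract_definition_mention.py | in_bracket
-- ===== SOURCE A (Python) =====
-- def in_bracket(tokens,index) :
-- 	for i in range(0,len(tokens)) :
-- 		if tokens[i] == '(' and i < index:
-- 			for j in range(i+1,len(tokens)) :
-- 				if tokens[j] == ')' :
-- 					if j > index :
-- 						return True
-- 					else :
-- 						break
-- 	return False
-- ===== SOURCE B (Python) =====
-- def in_bracket(tokens, index):
--     # One forward pass: keep a flag 'pending' = "some '(' before index is still
--     # unclosed by any ')' at a position <= index"; the first ')' past index with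
--     # pending set answers True.
--     pending = False
--     for pos, tok in enumerate(tokens):
--         if tok == '(':
--             if pos < index:
--                 pending = True
--         elif tok == ')':
--             if pos > index:
--                 if pending:
--                     return True
--             else:
--                 pending = False
--     return False
-- ===== Notes on version B (the rewrite author's own statement) =====
-- stated objective: alternative
-- what changed: Replaced the nested scan (for every '(' before index, rescan forward for the first ')') by a single forward pass carrying one boolean flag ('an unclosed "(" before index exists'), answering at the first ')' past index.
import Mathlib
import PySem

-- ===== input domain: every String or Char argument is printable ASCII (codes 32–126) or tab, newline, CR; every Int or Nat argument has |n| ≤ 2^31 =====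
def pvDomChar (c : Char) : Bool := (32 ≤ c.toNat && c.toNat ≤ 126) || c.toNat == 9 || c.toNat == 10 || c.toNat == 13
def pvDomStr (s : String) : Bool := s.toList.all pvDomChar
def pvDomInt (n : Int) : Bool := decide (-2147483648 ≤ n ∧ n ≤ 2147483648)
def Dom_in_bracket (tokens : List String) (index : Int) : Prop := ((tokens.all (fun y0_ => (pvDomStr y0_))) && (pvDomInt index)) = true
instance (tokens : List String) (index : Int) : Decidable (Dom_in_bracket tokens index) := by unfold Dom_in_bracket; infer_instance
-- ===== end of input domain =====

-- B replaces A's nested rescans with one forward pass and a boolean flag; same return value everywhere.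

-- ===== PORT A =====
-- A's inner loop: from the suffix after the '(', find the first ')'; True iff its
-- position exceeds index (break, i.e. continue the outer loop, otherwise).
def pvFindClose (rest : List String) (p : Nat) (index : Int) : Bool :=
  match rest with
  | [] => false
  | t :: r => if t = ")" then decide ((p : Int) > index) else pvFindClose r (p + 1) index

-- A's outer loop over i (as the suffix starting at position i).
def pvOuterA (rest : List String) (i : Nat) (index : Int) : Bool :=
  match rest with
  | [] => false
  | t :: r =>
    if t = "(" ∧ (i : Int) < index then
      if pvFindClose r (i + 1) index then true else pvOuterA r (i + 1) index
    else pvOuterA r (i + 1) index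

def in_bracket (tokens : List String) (index : Int) : Bool :=
  pvOuterA tokens 0 index

-- ===== PORT B =====
-- B's single forward pass with the 'pending' flag.
def pvAltGo (rest : List String) (pos : Nat) (index : Int) (pending : Bool) : Bool :=
  match rest with
  | [] => false
  | t :: r =>
    if t = "(" then
      pvAltGo r (pos + 1) index (if (pos : Int) < index then true else pending)
    else if t = ")" then
      if (pos : Int) > index then
        if pending then true else pvAltGo r (pos + 1) index pending
      else pvAltGo r (pos + 1) index false
    else pvAltGo r (pos + 1) index pending

def in_bracket_alt (tokens : List String) (index : Int) : Bool :=
  pvAltGo tokens 0 index false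

-- ===== PRECONDITION & SPEC =====
def Spec_in_bracket (tokens : List String) (index : Int) (out : Bool) : Prop := out = in_bracket_alt tokens index
instance (tokens : List String) (index : Int) (out : Bool) : Decidable (Spec_in_bracket tokens index out) := by unfold Spec_in_bracket; infer_instance

-- ===== CLAIM (what is proved, stated in full; the proofs are below) =====
def Claim_equal_in_bracket : Prop := ∀ (tokens : List String) (index : Int), Dom_in_bracket tokens index → Spec_in_bracket tokens index (in_bracket tokens index)

-- ===== LEMMAS AND PROOFS =====

-- Invariant connecting B's flag to A's loops: with the flag down the pass computes
-- A's outer loop; with the flag up it additionally answers True when the first ')'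
-- ahead lies past index.
theorem pvAltGo_eq (rest : List String) : ∀ (p : Nat) (index : Int) (b : Bool),
    pvAltGo rest p index b =
      (if b then (pvFindClose rest p index || pvOuterA rest p index) else pvOuterA rest p index) := by
  induction rest with
  | nil => intro p index b; cases b <;> simp [pvAltGo, pvFindClose, pvOuterA]
  | cons t r ih =>
    intro p index b
    by_cases hO : t = "("
    · subst hO
      by_cases hlt : (p : Int) < index <;>
        cases b <;>
        (simp [pvAltGo, pvFindClose, pvOuterA, hlt, ih];
         try cases pvFindClose r (p + 1) index <;> simp)
    · by_cases hC : t = ")"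
      · subst hC
        by_cases hgt : (p : Int) > index <;>
          cases b <;>
          (simp [pvAltGo, pvFindClose, pvOuterA, hO, hgt, ih];
           try omega)
      · cases b <;> simp [pvAltGo, pvFindClose, pvOuterA, hO, hC, ih]

-- ===== VERDICT (by name: the statement is the Claim_ definition above) =====
theorem in_bracket_spec : Claim_equal_in_bracket := by
  intro tokens index _
  unfold Spec_in_bracket in_bracket in_bracket_alt
  rw [pvAltGo_eq]; simp
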